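-- pv_equiv track=rewrite | github.com/bat67/The-Python-Standard-Library-by-Example | pdb/pdb_jump.py | f
-- ===== SOURCE A (Python) =====
-- def f(n):
--     result = []
--     j = 0
--     for i in range(n):
--         j = i * n + j
--         j += n
--         result.append(j)
--     return result
-- ===== SOURCE B (Python) =====
-- def f(n):
--     # Each element has the closed form n*(i+1)*(i+2)//2; no running accumulator.
--     return [n * (i + 1) * (i + 2) // 2 for i in range(n)]
-- ===== Notes on version B (the rewrite author's own statement) =====
-- stated objective: simpler
-- what changed: Replaced the threaded accumulator recurrence (j = i*n + j + n) by a per-index closed form n*(i+1)*(i+2)//2, computed independently for each i.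
import Mathlib
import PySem

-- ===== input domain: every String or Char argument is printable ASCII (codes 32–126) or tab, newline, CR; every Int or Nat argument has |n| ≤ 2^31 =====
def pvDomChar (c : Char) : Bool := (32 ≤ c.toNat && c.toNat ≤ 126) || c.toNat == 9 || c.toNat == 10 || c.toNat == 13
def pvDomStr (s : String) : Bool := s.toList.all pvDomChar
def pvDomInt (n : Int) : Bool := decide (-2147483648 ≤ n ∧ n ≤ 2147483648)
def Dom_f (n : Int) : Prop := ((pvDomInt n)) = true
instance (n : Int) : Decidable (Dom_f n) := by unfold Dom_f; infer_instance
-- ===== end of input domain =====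

-- B replaces A's threaded accumulator by the per-index closed form n*(i+1)*(i+2)//2 (simpler).

-- ===== PORT A =====
-- literal port: fold over range(n) threading (result, j)
def f (n : Int) : List Int :=
  ((PySem.List.pyRange 0 n 1).foldl
    (fun (st : List Int × Int) i => (st.1 ++ [i * n + st.2 + n], i * n + st.2 + n))
    (([] : List Int), (0 : Int))).1

-- ===== PORT B =====
def f_alt (n : Int) : List Int :=
  (PySem.List.pyRange 0 n 1).map (fun i => PySem.Int.floordiv (n * (i + 1) * (i + 2)) 2)

-- ===== PRECONDITION & SPEC =====
def Spec_f (n : Int) (out : List Int) : Prop := out = f_alt n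
instance (n : Int) (out : List Int) : Decidable (Spec_f n out) := by unfold Spec_f; infer_instance

-- ===== CLAIM (what is proved, stated in full; the proofs are below) =====
def Claim_equal_f : Prop := ∀ (n : Int), Dom_f n → Spec_f n (f n)

-- ===== LEMMAS AND PROOFS =====

-- the triangular-number tail: T (k+1) = (k+1)*(k+2)/2 as a Nat
def pvT (k : Nat) : Nat := k * (k + 1) / 2

lemma pvT_succ (k : Nat) : pvT (k + 1) = pvT k + (k + 1) := by
  unfold pvT
  have h : (k + 1) * (k + 1 + 1) = k * (k + 1) + (k + 1) * 2 := by ring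
  have he : k * (k + 1) % 2 = 0 := Nat.even_iff.mp (Nat.even_mul_succ_self k)
  omega

lemma pv_floordiv_closed (n : Int) (k : Nat) :
    PySem.Int.floordiv (n * ((k : Int) + 1) * ((k : Int) + 2)) 2 = n * (pvT (k + 1) : Int) := by
  rw [PySem.Int.floordiv_eq_ediv_of_pos (by norm_num)]
  have h : (k + 1) * (k + 1 + 1) = 2 * pvT (k + 1) := by
    unfold pvT
    have he : (k + 1) * (k + 1 + 1) % 2 = 0 := Nat.even_iff.mp (Nat.even_mul_succ_self (k + 1))
    omega
  have h' : ((k : Int) + 1) * ((k : Int) + 2) = 2 * (pvT (k + 1) : Int) := by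
    have := congrArg (Nat.cast : Nat → Int) h
    push_cast at this
    linarith
  calc (n * ((k : Int) + 1) * ((k : Int) + 2)) / 2
      = (2 * (n * (pvT (k + 1) : Int))) / 2 := by rw [mul_assoc, h']; ring_nf
    _ = n * (pvT (k + 1) : Int) := Int.mul_ediv_cancel_left _ (by norm_num)

lemma pv_fold_closed (n : Int) (m : Nat) :
    ((List.range m).map (Nat.cast : Nat → Int)).foldl
      (fun (st : List Int × Int) i => (st.1 ++ [i * n + st.2 + n], i * n + st.2 + n))
      (([] : List Int), (0 : Int))
    = ((List.range m).map (fun k => n * (pvT (k + 1) : Int)), n * (pvT m : Int)) := by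
  induction m with
  | zero => simp [pvT]
  | succ m ih =>
    rw [List.range_succ, List.map_append, List.foldl_append, ih, List.map_append]
    simp only [List.map_cons, List.map_nil, List.foldl_cons, List.foldl_nil]
    have hj : ((m : Int) * n + n * (pvT m : Int) + n) = n * (pvT (m + 1) : Int) := by
      rw [pvT_succ]; push_cast; ring
    rw [hj]

-- ===== VERDICT (by name: the statement is the Claim_ definition above) =====
theorem f_spec : Claim_equal_f := by
  intro n _
  unfold Spec_f f f_alt
  rw [PySem.List.pyRange_one]
  simp only [sub_zero, zero_add]
  rw [pv_fold_closed n n.toNat, List.map_map]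
  apply List.map_congr_left
  intro k _
  exact (pv_floordiv_closed n k).symm
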